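-- pv_equiv track=rewrite | github.com/pypi-data/pypi-mirror-230 | packages/oarepo-model-builder/oarepo_model_builder-4.0.40-py3-none-any.whl/oarepo_model_builder/utils/python_name.py | qualified_name
-- ===== SOURCE A (Python) =====
-- def qualified_name(package_name: str, class_name: str):
--     if "." not in class_name:
--         return f"{package_name}.{class_name}"
--     if class_name.startswith("."):
--         # package_name: aaa.bbb, class name .C => aaa.bbb.C
--         # package_name: aaa.bbb, class name ..C => aaa.C
--         # package_name: aaa.bbb, class name ...C => C
--         class_name = class_name[1:]
--         package_path = package_name.split(".")
--         while class_name.startswith("."):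
--             if package_path:
--                 package_path = package_path[:-1]
--             class_name = class_name[1:]
--         if package_path:
--             class_name = f"{'.'.join(package_path)}.{class_name}"
--     return class_name
-- ===== SOURCE B (Python) =====
-- def qualified_name(package_name: str, class_name: str):
--     if "." not in class_name:
--         return f"{package_name}.{class_name}"
--     if not class_name.startswith("."):
--         return class_name
--     remaining = class_name.lstrip(".")
--     n = len(class_name) - len(remaining)  # number of leading dots
--     parts = package_name.split(".")
--     keep = max(0, len(parts) - (n - 1))   # first dot is only the relative marker
--     if keep > 0:
--         return f"{'.'.join(parts[:keep])}.{remaining}"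
--     return remaining
-- ===== Notes on version B (the rewrite author's own statement) =====
-- stated objective: simpler
-- what changed: Replaces the one-dot-at-a-time while loop that repeatedly pops the last package component with closed-form arithmetic: count the leading dots once with lstrip, compute how many package components to keep, and slice the split package once.
import Mathlib
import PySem

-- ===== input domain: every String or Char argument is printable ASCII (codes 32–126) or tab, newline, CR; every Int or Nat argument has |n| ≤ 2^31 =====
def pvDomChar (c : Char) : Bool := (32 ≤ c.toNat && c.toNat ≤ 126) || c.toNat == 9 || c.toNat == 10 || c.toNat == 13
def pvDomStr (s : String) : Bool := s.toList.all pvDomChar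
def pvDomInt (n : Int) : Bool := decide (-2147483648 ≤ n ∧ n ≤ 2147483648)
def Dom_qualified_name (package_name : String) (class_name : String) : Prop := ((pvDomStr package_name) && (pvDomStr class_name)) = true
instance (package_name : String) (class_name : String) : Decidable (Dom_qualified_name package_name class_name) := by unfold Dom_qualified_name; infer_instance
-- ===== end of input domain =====

-- B replaces A's pop-one-component-per-dot while loop by closed-form arithmetic
-- (count leading dots once, slice the split package once); objective: simpler.

-- ===== PORT A =====
-- the 'while class_name.startswith("."):' loop of A, over (package_path, class_name as chars)
def qnWhileA : List (List Char) → List Char → List (List Char) × List Char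
  | pp, c :: rest =>
      if c = '.' then qnWhileA (if pp = [] then pp else pp.dropLast) rest
      else (pp, c :: rest)
  | pp, [] => (pp, [])

def qualified_name (package_name : String) (class_name : String) : String :=
  if PySem.Str.isIn "." class_name = false then
    -- f"{package_name}.{class_name}"
    PySem.Str.join "" [package_name, ".", class_name]
  else if PySem.Str.startswith class_name "." then
    -- class_name[1:] is .drop 1; package_name.split(".") is Chars.splitOn; then the while loop,
    -- then (if package_path nonempty) f"{'.'.join(package_path)}.{class_name}"
    if (qnWhileA (PySem.Chars.splitOn package_name.toList ['.']) (class_name.toList.drop 1)).1 ≠ [] then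
      String.ofList
        (PySem.Chars.join ['.'] (qnWhileA (PySem.Chars.splitOn package_name.toList ['.']) (class_name.toList.drop 1)).1
          ++ '.' :: (qnWhileA (PySem.Chars.splitOn package_name.toList ['.']) (class_name.toList.drop 1)).2)
    else
      String.ofList (qnWhileA (PySem.Chars.splitOn package_name.toList ['.']) (class_name.toList.drop 1)).2
  else class_name

-- ===== PORT B =====
-- remaining = class_name.lstrip('.') is dropWhile (· == '.'); n = len(class_name) - len(remaining);
-- keep = max(0, len(parts) - (n - 1)); parts[:keep] with keep ≥ 0 is take keep.toNat
def qualified_name_alt (package_name : String) (class_name : String) : String :=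
  if PySem.Str.isIn "." class_name = false then
    PySem.Str.join "" [package_name, ".", class_name]
  else if PySem.Str.startswith class_name "." = false then
    class_name
  else
    if 0 < max 0 ((((PySem.Chars.splitOn package_name.toList ['.']).length : Int)) -
        (((PySem.Str.len class_name : Int) - ((class_name.toList.dropWhile (fun c => c == '.')).length : Int)) - 1)) then
      String.ofList
        (PySem.Chars.join ['.']
          ((PySem.Chars.splitOn package_name.toList ['.']).take
            (max 0 ((((PySem.Chars.splitOn package_name.toList ['.']).length : Int)) -
              (((PySem.Str.len class_name : Int) - ((class_name.toList.dropWhile (fun c => c == '.')).length : Int)) - 1))).toNat)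
          ++ '.' :: class_name.toList.dropWhile (fun c => c == '.'))
    else
      String.ofList (class_name.toList.dropWhile (fun c => c == '.'))

-- ===== PRECONDITION & SPEC =====
def Spec_qualified_name (package_name : String) (class_name : String) (out : String) : Prop := out = qualified_name_alt package_name class_name
instance (package_name : String) (class_name : String) (out : String) : Decidable (Spec_qualified_name package_name class_name out) := by unfold Spec_qualified_name; infer_instance

-- ===== CLAIM (what is proved, stated in full; the proofs are below) =====
def Claim_equal_qualified_name : Prop := ∀ (package_name : String) (class_name : String), Dom_qualified_name package_name class_name → Spec_qualified_name package_name class_name (qualified_name package_name class_name)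

-- ===== LEMMAS AND PROOFS =====

-- A's while loop in closed form: it pops one component per leading dot
theorem qnWhileA_eq (cn : List Char) : ∀ pp : List (List Char),
    qnWhileA pp cn =
      (pp.take (pp.length - (cn.takeWhile (fun c => c == '.')).length),
       cn.dropWhile (fun c => c == '.')) := by
  induction cn with
  | nil => intro pp; simp [qnWhileA]
  | cons c rest ih =>
      intro pp
      by_cases hc : c = '.'
      · subst hc
        have hguard : (if pp = [] then pp else pp.dropLast) = pp.dropLast := by
          split <;> simp_all
        rw [qnWhileA, if_pos rfl, hguard, ih]
        have hdl : pp.dropLast = pp.take (pp.length - 1) := by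
          simp [List.dropLast_eq_take]
        simp only [Prod.mk.injEq]
        refine ⟨?_, ?_⟩
        · rw [hdl, List.take_take]
          congr 1
          simp [List.length_take]
          omega
        · simp
      · rw [qnWhileA, if_neg hc]
        have h1 : (c == '.') = false := by simp [hc]
        simp [List.takeWhile, List.dropWhile, h1]

theorem qualified_name_spec : Claim_equal_qualified_name := by
  intro package_name class_name _
  unfold Spec_qualified_name qualified_name qualified_name_alt
  by_cases hin : PySem.Str.isIn "." class_name = false
  · rw [if_pos hin, if_pos hin]
  · rw [if_neg hin, if_neg hin]
    by_cases hsw : PySem.Str.startswith class_name "." = true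
    · rw [if_pos hsw, if_neg (by rw [hsw]; simp : ¬ PySem.Str.startswith class_name "." = false)]
      have hpre : ("." : String).toList <+: class_name.toList := by
        exact (PySem.Chars.startswith_iff class_name.toList ("." : String).toList).mp
          (by simpa using hsw)
      obtain ⟨t, ht⟩ := hpre
      have ht' : class_name.toList = '.' :: t := by simpa using ht.symm
      set parts := PySem.Chars.splitOn package_name.toList ['.'] with hparts
      set k := (t.takeWhile (fun c => c == '.')).length with hk
      have hdrop1 : class_name.toList.drop 1 = t := by rw [ht']; rfl
      have hdw : class_name.toList.dropWhile (fun c => c == '.') =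
          t.dropWhile (fun c => c == '.') := by
        rw [ht']; simp [List.dropWhile]
      have hlen : PySem.Str.len class_name = t.length + 1 := by
        simp [PySem.Str.len, ht']
      have hrem : (t.dropWhile (fun c => c == '.')).length = t.length - k := by
        have h2 := congrArg List.length
          (List.takeWhile_append_dropWhile (p := fun c => c == '.') (l := t))
        simp only [List.length_append] at h2
        omega
      have hkle : k ≤ t.length := by
        have := (List.takeWhile_prefix (p := fun c => c == '.') (l := t)).length_le
        simpa [hk] using this
      rw [hdrop1, qnWhileA_eq, hdw]
      simp only [← hk]
      -- B's Int arithmetic: keep.toNat = parts.length - k, and 0 < keep ↔ k < parts.length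
      have hn : (PySem.Str.len class_name : Int) -
          ((t.dropWhile (fun c => c == '.')).length : Int) - 1 = (k : Int) := by
        rw [hlen, hrem]; omega
      rw [hn]
      by_cases hpk : k < parts.length
      · have hpos : 0 < max 0 ((parts.length : Int) - (k : Int)) := by omega
        have htoNat : (max 0 ((parts.length : Int) - (k : Int))).toNat = parts.length - k := by
          omega
        have hne : parts.take (parts.length - k) ≠ [] := by
          intro hcon
          have h1 := congrArg List.length hcon
          rw [List.length_take] at h1
          simp at h1
          omega
        rw [if_pos hne, if_pos hpos, htoNat]
      · have hz : parts.length - k = 0 := by omega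
        have hnil : parts.take (parts.length - k) = [] := by rw [hz]; rfl
        have hnp : ¬ (0 < max 0 ((parts.length : Int) - (k : Int))) := by omega
        rw [if_neg (by rw [hnil]; simp : ¬ parts.take (parts.length - k) ≠ []), if_neg hnp]
    · rw [if_neg hsw, if_pos (by simpa using hsw)]
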